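-- pv_equiv track=rewrite | github.com/Ssunbell/Algorithm_Study | 27주차/PRO_자동완성/PRO_자동완성_유선종.py | solution
-- ===== SOURCE A (Python) =====
-- def bi_gram(target:str, word:str) -> int:
--     for cnt in range(1, len(target)):
--         if (target[:cnt] != word[:cnt]):
--             return cnt
--
--     return len(target)
--
-- def tri_gram(left_word:str, target:str, right_word:str) -> int:
--     for cnt in range(1, len(target)):
--         if (target[:cnt] != left_word[:cnt]) and (target[:cnt] != right_word[:cnt]):
--             return cnt
--
--     return len(target)
--
-- def solution(words:list) -> int:
--     words.sort()
--     cnt = bi_gram(target=words[0], word=words[1])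
--     if len(words) > 2:
--         cnt += bi_gram(target=words[-1], word=words[-2])
--     for idx in range(1, len(words)-1):
--         cnt += tri_gram(words[idx-1], words[idx], words[idx+1])
--
--     return cnt
-- ===== SOURCE B (Python) =====
-- def _lcp(a, b):
--     k = 0
--     for x, y in zip(a, b):
--         if x != y:
--             break
--         k += 1
--     return k
--
--
-- def solution(words: list) -> int:
--     ws = sorted(words)
--     n = len(ws)
--     lcps = [_lcp(ws[i], ws[i + 1]) for i in range(n - 1)]
--     total = 0
--     for i in range(n):
--         left = lcps[i - 1] if i > 0 else 0
--         right = lcps[i] if i < n - 1 else 0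
--         total += min(max(left, right) + 1, len(ws[i]))
--     return total
-- ===== Notes on version B (the rewrite author's own statement) =====
-- stated objective: alternative
-- what changed: B computes each adjacent pair's longest common prefix once with a single char-by-char scan and sums min(max(left,right)+1, len) per word, instead of A's per-word loop that rebuilds and compares whole prefix slices of growing length; B also sorts a copy instead of mutating the input list.
-- intended difference: On lists of exactly two words with at least one nonempty word, A returns only the first sorted word's character count (its second bi_gram call is guarded by len(words) > 2, so the last word is never counted), while B counts both words; counting every word is the intended total. — e.g. on solution(["go", "gone"]): A returns 2, B returns 5
import Mathlib
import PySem

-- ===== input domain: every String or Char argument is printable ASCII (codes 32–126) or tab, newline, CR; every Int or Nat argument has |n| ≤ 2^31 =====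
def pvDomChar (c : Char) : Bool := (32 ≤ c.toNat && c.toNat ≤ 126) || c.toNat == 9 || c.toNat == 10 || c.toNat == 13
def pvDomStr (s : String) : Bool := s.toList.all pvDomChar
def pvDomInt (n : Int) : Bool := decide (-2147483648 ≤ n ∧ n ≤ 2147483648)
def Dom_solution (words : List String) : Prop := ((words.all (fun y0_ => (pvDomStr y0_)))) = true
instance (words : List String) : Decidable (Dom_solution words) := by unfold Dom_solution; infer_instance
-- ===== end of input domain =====

-- B computes each adjacent longest-common-prefix once by a char-by-char scan and sums a per-word
-- formula, instead of A's repeated whole-prefix slice comparisons (an alternative algorithm; no speed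
-- claim). A sorts its argument list in place (observable mutation), B sorts a copy — the equivalence
-- proved here is about the return value only.

-- ===== PORT A =====
-- 'for cnt in range(1, len(target)): if target[:cnt] != word[:cnt]: return cnt' then 'return len(target)'
def biLoop (t w : List Char) : List Int → Int
  | [] => (t.length : Int)
  | cnt :: rest =>
    if PySem.List.slice t none (some cnt) ≠ PySem.List.slice w none (some cnt) then cnt
    else biLoop t w rest

def bi_gram (target word : String) : Int :=
  let t := target.toList
  biLoop t word.toList (PySem.List.pyRange 1 (t.length : Int) 1)

def triLoop (l t r : List Char) : List Int → Int
  | [] => (t.length : Int)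
  | cnt :: rest =>
    if PySem.List.slice t none (some cnt) ≠ PySem.List.slice l none (some cnt) ∧
       PySem.List.slice t none (some cnt) ≠ PySem.List.slice r none (some cnt) then cnt
    else triLoop l t r rest

def tri_gram (left_word target right_word : String) : Int :=
  let t := target.toList
  triLoop left_word.toList t right_word.toList (PySem.List.pyRange 1 (t.length : Int) 1)

-- words.sort(): Python compares strings by code points = the List Char lexicographic order
def solution (words : List String) : Int :=
  let ws := PySem.List.sorted words (fun x => x.toList) false
  let n : Int := PySem.List.len ws
  let get : Int → String := fun i => PySem.List.pyGetD ws i ""   -- words[i]; in range under Pre_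
  let cnt := bi_gram (get 0) (get 1)
  let cnt := if n > 2 then cnt + bi_gram (get (-1)) (get (-2)) else cnt
  (PySem.List.pyRange 1 (n - 1) 1).foldl
    (fun acc idx => acc + tri_gram (get (idx - 1)) (get idx) (get (idx + 1))) cnt

-- ===== PORT B =====
def lcpChars (a b : List Char) : Int :=
  match a, b with
  | x :: xs, y :: ys => if x = y then 1 + lcpChars xs ys else 0
  | _, _ => 0

-- sorted(words): Python compares strings by code points = the List Char lexicographic order
def solution_alt (words : List String) : Int :=
  let ws := PySem.List.sorted words (fun x => x.toList) false
  let n := ws.length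
  let lcps := (List.range (n - 1)).map
    (fun i => lcpChars (ws.getD i "").toList (ws.getD (i + 1) "").toList)
  (List.range n).foldl
    (fun total i =>
      let left := if 0 < i then lcps.getD (i - 1) 0 else 0
      let right := if i < n - 1 then lcps.getD i 0 else 0
      total + min (max left right + 1) ((ws.getD i "").toList.length : Int)) 0

-- ===== PRECONDITION & SPEC =====
-- A raises IndexError (words[1]) on lists of fewer than two words; Pre_ excludes exactly those.
def Pre_solution (words : List String) : Prop := 2 ≤ words.length
instance (words : List String) : Decidable (Pre_solution words) := by
  unfold Pre_solution; infer_instance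
def pvWitness_solution : List String := ["go", "gone", "guild"]

-- On lists of exactly two words at least one of which is nonempty, A returns only the first sorted
-- word's count (the second bi_gram call is guarded by len(words) > 2, so the last word is never
-- counted), while B counts both words; counting every word is the intended total.
def D_solution (words : List String) : Prop :=
  words.length = 2 ∧ (words.any (fun w => w ≠ "")) = true
instance (words : List String) : Decidable (D_solution words) := by
  unfold D_solution; infer_instance

def Spec_solution (words : List String) (out : Int) : Prop :=
  ¬ D_solution words → out = solution_alt words
instance (words : List String) (out : Int) : Decidable (Spec_solution words out) := by
  unfold Spec_solution; infer_instance

def pvDiffWitness_solution : List String := ["go", "gone"]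
def pvDiffWitnessOut_solution : Int × Int := (2, 5)

-- ===== CLAIM (what is proved, stated in full; the proofs are below) =====
def Claim_unchanged_solution : Prop :=
  ∀ (words : List String), Dom_solution words → Pre_solution words →
    Spec_solution words (solution words)
def Claim_changed_solution : Prop :=
  Dom_solution (pvDiffWitness_solution) ∧ Pre_solution (pvDiffWitness_solution) ∧
  D_solution (pvDiffWitness_solution) ∧
  solution (pvDiffWitness_solution) = pvDiffWitnessOut_solution.1 ∧
  solution_alt (pvDiffWitness_solution) = pvDiffWitnessOut_solution.2 ∧
  pvDiffWitnessOut_solution.1 ≠ pvDiffWitnessOut_solution.2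

-- ===== LEMMAS AND PROOFS =====

-- natural-number longest common prefix: the proof-side value of both programs' scans
def lcpN : List Char → List Char → Nat
  | x :: xs, y :: ys => if x = y then lcpN xs ys + 1 else 0
  | _, _ => 0

theorem lcpN_comm (a b : List Char) : lcpN a b = lcpN b a := by
  induction a generalizing b with
  | nil => cases b <;> simp [lcpN]
  | cons x xs ih =>
    cases b with
    | nil => simp [lcpN]
    | cons y ys =>
      simp only [lcpN]
      by_cases h : x = y
      · subst h; simp [ih]
      · simp [h, Ne.symm h]

theorem lcpN_self (a : List Char) : lcpN a a = a.length := by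
  induction a with
  | nil => simp [lcpN]
  | cons x xs ih => simp [lcpN, ih]

theorem lcpChars_eq (a b : List Char) : lcpChars a b = (lcpN a b : Int) := by
  induction a generalizing b with
  | nil => cases b <;> simp [lcpChars, lcpN]
  | cons x xs ih =>
    cases b with
    | nil => simp [lcpChars, lcpN]
    | cons y ys =>
      simp only [lcpChars, lcpN]
      split <;> simp [ih] <;> omega

theorem take_eq_iff (t w : List Char) (n : Nat) :
    t.take n = w.take n ↔ n ≤ lcpN t w ∨ t = w := by
  induction t generalizing w n with
  | nil =>
    cases w <;> cases n <;> simp [lcpN]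
  | cons x xs ih =>
    cases w with
    | nil => cases n <;> simp [lcpN]
    | cons y ys =>
      cases n with
      | zero => simp [lcpN]
      | succ k =>
        simp only [List.take_succ_cons, List.cons.injEq, lcpN]
        by_cases h : x = y
        · subst h
          simp [ih, Nat.add_le_add_iff_right]
        · simp [h]

theorem biLoop_never (t w : List Char) (l : List Int)
    (h : ∀ x ∈ l, PySem.List.slice t none (some x) = PySem.List.slice w none (some x)) :
    biLoop t w l = (t.length : Int) := by
  induction l with
  | nil => rfl
  | cons c rest ih =>
    simp only [biLoop, h c (by simp), ite_not, if_pos rfl]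
    exact ih (fun x hx => h x (by simp [hx]))

theorem biLoop_range (t w : List Char) (hne : t ≠ w) (a : Int)
    (h1 : 1 ≤ a) (h2 : a ≤ (lcpN t w : Int) + 1) :
    biLoop t w (PySem.List.pyRange a (t.length : Int) 1) =
      min ((lcpN t w : Int) + 1) (t.length : Int) := by
  have key : ∀ (k : Nat) (a : Int), ((t.length : Int) - a).toNat ≤ k → 1 ≤ a →
      a ≤ (lcpN t w : Int) + 1 →
      biLoop t w (PySem.List.pyRange a (t.length : Int) 1) =
        min ((lcpN t w : Int) + 1) (t.length : Int) := by
    intro k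
    induction k with
    | zero =>
      intro a hk ha1 ha2
      rw [PySem.List.pyRange_one_eq_nil (by omega)]
      simp only [biLoop]
      omega
    | succ k ih =>
      intro a hk ha1 ha2
      by_cases hb : (t.length : Int) ≤ a
      · rw [PySem.List.pyRange_one_eq_nil hb]
        simp only [biLoop]
        omega
      · push_neg at hb
        rw [PySem.List.pyRange_one_cons hb]
        simp only [biLoop]
        rw [PySem.List.slice_to t (by omega), PySem.List.slice_to w (by omega)]
        by_cases hp : t.take a.toNat = w.take a.toNat
        · rw [if_neg (by simp [hp])]
          have hle : a.toNat ≤ lcpN t w := ((take_eq_iff t w a.toNat).mp hp).resolve_right hne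
          exact ih (a + 1) (by omega) (by omega) (by omega)
        · rw [if_pos (by simp [hp])]
          have hgt : ¬ (a.toNat ≤ lcpN t w ∨ t = w) := by
            intro hc
            exact hp ((take_eq_iff t w a.toNat).mpr hc)
          push_neg at hgt
          omega
  exact key ((t.length : Int) - a).toNat a le_rfl h1 h2

theorem triLoop_never (l t r : List Char) (li : List Int)
    (h : ∀ x ∈ li, PySem.List.slice t none (some x) = PySem.List.slice l none (some x) ∨
         PySem.List.slice t none (some x) = PySem.List.slice r none (some x)) :
    triLoop l t r li = (t.length : Int) := by
  induction li with
  | nil => rfl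
  | cons c rest ih =>
    have := h c (by simp)
    simp only [triLoop]
    rw [if_neg (by tauto)]
    exact ih (fun x hx => h x (by simp [hx]))

theorem triLoop_range (l t r : List Char) (hl : t ≠ l) (hr : t ≠ r) (a : Int)
    (h1 : 1 ≤ a) (h2 : a ≤ (max (lcpN t l) (lcpN t r) : Nat) + 1) :
    triLoop l t r (PySem.List.pyRange a (t.length : Int) 1) =
      min ((max (lcpN t l) (lcpN t r) : Nat) + 1 : Int) (t.length : Int) := by
  have key : ∀ (k : Nat) (a : Int), ((t.length : Int) - a).toNat ≤ k → 1 ≤ a →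
      a ≤ (max (lcpN t l) (lcpN t r) : Nat) + 1 →
      triLoop l t r (PySem.List.pyRange a (t.length : Int) 1) =
        min ((max (lcpN t l) (lcpN t r) : Nat) + 1 : Int) (t.length : Int) := by
    intro k
    induction k with
    | zero =>
      intro a hk ha1 ha2
      rw [PySem.List.pyRange_one_eq_nil (by omega)]
      simp only [triLoop]
      omega
    | succ k ih =>
      intro a hk ha1 ha2
      by_cases hb : (t.length : Int) ≤ a
      · rw [PySem.List.pyRange_one_eq_nil hb]
        simp only [triLoop]
        omega
      · push_neg at hb
        rw [PySem.List.pyRange_one_cons hb]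
        simp only [triLoop]
        rw [PySem.List.slice_to t (by omega), PySem.List.slice_to l (by omega),
            PySem.List.slice_to r (by omega)]
        by_cases hpl : t.take a.toNat = l.take a.toNat
        · rw [if_neg (by simp [hpl])]
          have hle : a.toNat ≤ lcpN t l := ((take_eq_iff t l a.toNat).mp hpl).resolve_right hl
          exact ih (a + 1) (by omega) (by omega) (by omega)
        · by_cases hpr : t.take a.toNat = r.take a.toNat
          · rw [if_neg (by simp [hpr])]
            have hle : a.toNat ≤ lcpN t r := ((take_eq_iff t r a.toNat).mp hpr).resolve_right hr
            exact ih (a + 1) (by omega) (by omega) (by omega)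
          · rw [if_pos ⟨by simp [hpl], by simp [hpr]⟩]
            have hgl : ¬ (a.toNat ≤ lcpN t l ∨ t = l) := by
              intro hc; exact hpl ((take_eq_iff t l a.toNat).mpr hc)
            have hgr : ¬ (a.toNat ≤ lcpN t r ∨ t = r) := by
              intro hc; exact hpr ((take_eq_iff t r a.toNat).mpr hc)
            push_neg at hgl
            push_neg at hgr
            omega
  exact key ((t.length : Int) - a).toNat a le_rfl h1 h2

theorem bi_gram_eq (target word : String) :
    bi_gram target word =
      min ((lcpN target.toList word.toList : Int) + 1) (target.toList.length : Int) := by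
  unfold bi_gram
  by_cases hne : target.toList = word.toList
  · rw [biLoop_never _ _ _ (fun x _ => by rw [hne])]
    have := lcpN_self target.toList
    rw [hne] at this ⊢
    omega
  · rw [biLoop_range _ _ hne 1 le_rfl (by omega)]

theorem tri_gram_eq (lw target rw : String) :
    tri_gram lw target rw =
      min ((max (lcpN target.toList lw.toList) (lcpN target.toList rw.toList) : Nat) + 1 : Int)
          (target.toList.length : Int) := by
  unfold tri_gram
  by_cases hl : target.toList = lw.toList
  · rw [triLoop_never _ _ _ _ (fun x _ => Or.inl (by rw [hl]))]
    have h1 : lcpN target.toList lw.toList = target.toList.length := by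
      rw [hl, lcpN_self]
    omega
  · by_cases hr : target.toList = rw.toList
    · rw [triLoop_never _ _ _ _ (fun x _ => Or.inr (by rw [hr]))]
      have h1 : lcpN target.toList rw.toList = target.toList.length := by
        rw [hr, lcpN_self]
      omega
    · rw [triLoop_range _ _ _ hl hr 1 le_rfl (by omega)]

-- per-word contribution, indexed over the sorted list
def gTerm (ws : List String) (i : Nat) : Int :=
  let li : Int := if 0 < i then (lcpN (ws.getD i "").toList (ws.getD (i - 1) "").toList : Int) else 0
  let ri : Int := if i < ws.length - 1 then (lcpN (ws.getD i "").toList (ws.getD (i + 1) "").toList : Int) else 0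
  min (max li ri + 1) ((ws.getD i "").toList.length : Int)

theorem sum_split (f : Nat → Int) (n : Nat) (h : 2 ≤ n) :
    ((List.range n).map f).sum =
      f 0 + f (n - 1) + ((List.range (n - 2)).map (fun k => f (k + 1))).sum := by
  obtain ⟨m, rfl⟩ : ∃ m, n = m + 2 := ⟨n - 2, by omega⟩
  rw [List.range_succ, List.range_succ_eq_map]
  simp [List.map_map, Function.comp_def]
  ring

theorem B_sum (words : List String) :
    solution_alt words =
      ((List.range (PySem.List.sorted words (fun x => x.toList) false).length).map
        (gTerm (PySem.List.sorted words (fun x => x.toList) false))).sum := by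
  unfold solution_alt
  set ws := PySem.List.sorted words (fun x => x.toList) false with hws
  simp only []
  rw [PySem.List.foldl_add, zero_add]
  apply congrArg
  apply List.map_congr_left
  intro i hi
  have hin : i < ws.length := List.mem_range.mp hi
  unfold gTerm
  simp only []
  by_cases h0 : 0 < i <;> by_cases hr : i < ws.length - 1
  · rw [if_pos h0, if_pos hr,
        PySem.List.getD_map_range _ _ _ _ (by omega : i - 1 < ws.length - 1),
        PySem.List.getD_map_range _ _ _ _ (by omega : i < ws.length - 1),
        lcpChars_eq, lcpChars_eq,
        show i - 1 + 1 = i from by omega,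
        lcpN_comm ((ws.getD (i - 1) "").toList)]
    simp [h0, hr]
  · rw [if_pos h0, if_neg hr,
        PySem.List.getD_map_range _ _ _ _ (by omega : i - 1 < ws.length - 1),
        lcpChars_eq,
        show i - 1 + 1 = i from by omega,
        lcpN_comm ((ws.getD (i - 1) "").toList)]
    simp [h0, hr]
  · rw [if_neg h0, if_pos hr,
        PySem.List.getD_map_range _ _ _ _ (by omega : i < ws.length - 1),
        lcpChars_eq]
    simp [h0, hr]
  · simp [h0, hr]

theorem A_sum (words : List String) (h3 : 3 ≤ words.length) :
    solution words =
      ((List.range (PySem.List.sorted words (fun x => x.toList) false).length).map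
        (gTerm (PySem.List.sorted words (fun x => x.toList) false))).sum := by
  unfold solution
  set ws := PySem.List.sorted words (fun x => x.toList) false with hws
  have hlen : ws.length = words.length := PySem.List.length_sorted words _ false
  simp only [PySem.List.len_eq]
  rw [if_pos (by omega : ((ws.length : Int)) > 2)]
  rw [PySem.List.foldl_add]
  rw [sum_split _ _ (by omega)]
  have piece0 : bi_gram (PySem.List.pyGetD ws 0 "") (PySem.List.pyGetD ws 1 "") =
      gTerm ws 0 := by
    rw [PySem.List.pyGetD_zero, PySem.List.pyGetD_ofNat' ws 1 "", bi_gram_eq]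
    unfold gTerm
    simp only [Nat.zero_add]
    rw [if_neg (lt_irrefl 0), if_pos (by omega : 0 < ws.length - 1),
        max_eq_right (Int.natCast_nonneg _)]
  have piecelast : bi_gram (PySem.List.pyGetD ws (-1) "") (PySem.List.pyGetD ws (-2) "") =
      gTerm ws (ws.length - 1) := by
    rw [PySem.List.pyGetD_neg_ofNat ws 1 "" (by omega) (by omega),
        PySem.List.pyGetD_neg_ofNat ws 2 "" (by omega) (by omega),
        ← List.getD_eq_getElem ws "" (by omega : ws.length - 1 < ws.length),
        ← List.getD_eq_getElem ws "" (by omega : ws.length - 2 < ws.length),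
        bi_gram_eq]
    unfold gTerm
    simp only []
    rw [if_pos (by omega : 0 < ws.length - 1),
        if_neg (by omega : ¬ ws.length - 1 < ws.length - 1),
        max_eq_left (Int.natCast_nonneg _),
        show ws.length - 1 - 1 = ws.length - 2 from by omega]
  have piecemid : ((PySem.List.pyRange 1 ((ws.length : Int) - 1)).map
      (fun idx => tri_gram (PySem.List.pyGetD ws (idx - 1) "") (PySem.List.pyGetD ws idx "")
        (PySem.List.pyGetD ws (idx + 1) ""))).sum =
      ((List.range (ws.length - 2)).map (fun k => gTerm ws (k + 1))).sum := by
    rw [PySem.List.pyRange_one, List.map_map,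
        show ((ws.length : Int) - 1 - 1).toNat = ws.length - 2 from by omega]
    apply congrArg
    apply List.map_congr_left
    intro k hk
    have hkn : k < ws.length - 2 := List.mem_range.mp hk
    simp only [Function.comp_apply]
    rw [show (1 : Int) + (k : Int) - 1 = ((k : Nat) : Int) from by omega,
        show (1 : Int) + (k : Int) = (((k + 1 : Nat)) : Int) from by push_cast; omega,
        show (((k + 1 : Nat)) : Int) + 1 = (((k + 2 : Nat)) : Int) from by push_cast; omega,
        PySem.List.pyGetD_natCast, PySem.List.pyGetD_natCast, PySem.List.pyGetD_natCast,
        tri_gram_eq]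
    unfold gTerm
    simp only []
    rw [if_pos (by omega : 0 < k + 1), if_pos (by omega : k + 1 < ws.length - 1),
        show k + 1 - 1 = k from by omega, show k + 1 + 1 = k + 2 from by omega]
    push_cast
    rfl
  rw [piece0, piecelast, piecemid]

theorem main_eq (words : List String) (h3 : 3 ≤ words.length ∨
    (words.length = 2 ∧ ∀ w ∈ words, w = "")) :
    solution words = solution_alt words := by
  rcases h3 with h3 | ⟨h2, hall⟩
  · rw [A_sum words h3, B_sum words]
  · rcases words with _ | ⟨a, _ | ⟨b, _ | ⟨c, rest⟩⟩⟩ <;> simp at h2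
    have ha := hall a (by simp)
    have hb := hall b (by simp)
    subst ha hb
    decide

-- ===== VERDICT (by name: the statement is the Claim_ definition above) =====
theorem solution_spec : Claim_unchanged_solution := by
  intro words _ hpre hnd
  apply main_eq
  unfold Pre_solution at hpre
  by_cases h2 : words.length = 2
  · right
    refine ⟨h2, fun w hw => ?_⟩
    by_contra hne
    exact hnd ⟨h2, by simp only [List.any_eq_true]; exact ⟨w, hw, by simp [hne]⟩⟩
  · left; omega

theorem solution_changed : Claim_changed_solution := by
  unfold Claim_changed_solution; decide
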